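-- pv_equiv track=rewrite | github.com/Silversanatan/Chatbot.py | Fall 2025/shorts6_template/fake_news.py | process_title
-- ===== SOURCE A (Python) =====
-- import string
--
-- def process_title(title_string):
--     """Cleans a title string to produce a list of standardized words.
--
--        This function replaces all punctuation with spaces, splits the title
--        into words, filters out any words with 2 or fewer characters, and
--        converts all remaining words to lowercase.
--
--        Parameters: title_string is the raw string of the article title.
--
--        Returns: A list of cleaned and standardized word strings.
--     """
--     processed_str = ""
--     for char in title_string:
--         # Replace punctuation with a space to handle cases like "word,word".
--         if char in string.punctuation:
--             processed_str += " "
--         else: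
--             processed_str += char
--     words = processed_str.split()
--     cleaned_list = []
--     for word in words:
--         if len(word) > 2:
--             cleaned_list.append(word.lower())
--     return cleaned_list
-- ===== SOURCE B (Python) =====
-- import string
--
-- def process_title(title_string):
--     """One-pass tokenizer: scan once, flushing the buffer at punctuation/whitespace."""
--     words = []
--     buf = []
--     for ch in title_string:
--         if ch.isspace() or ch in string.punctuation:
--             if len(buf) > 2:
--                 words.append(''.join(buf).lower())
--             buf = []
--         else:
--             buf.append(ch)
--     if len(buf) > 2:
--         words.append(''.join(buf).lower())
--     return words
-- ===== Notes on version B (the rewrite author's own statement) =====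
-- stated objective: alternative
-- what changed: Replaces A's three passes (build a punctuation-replaced copy via string concatenation, split it, then filter+lower) with a single left-to-right scan that maintains a word buffer and flushes it at any punctuation or whitespace character.
import Mathlib
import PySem

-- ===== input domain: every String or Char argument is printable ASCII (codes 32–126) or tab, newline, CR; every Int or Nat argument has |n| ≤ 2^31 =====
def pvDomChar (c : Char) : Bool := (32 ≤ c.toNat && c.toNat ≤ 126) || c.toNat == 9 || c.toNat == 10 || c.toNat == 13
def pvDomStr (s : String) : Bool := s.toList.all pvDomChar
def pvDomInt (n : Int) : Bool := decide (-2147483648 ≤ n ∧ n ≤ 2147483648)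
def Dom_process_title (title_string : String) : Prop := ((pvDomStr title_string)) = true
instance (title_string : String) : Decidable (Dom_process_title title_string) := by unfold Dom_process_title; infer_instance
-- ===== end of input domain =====

-- B replaces A's three passes (replace punctuation, split, filter+lower) by a single scan with a word buffer (objective: alternative, same cost).

-- string.punctuation (shared constant of both Pythons)
def pvPunct : List Char := "!\"#$%&'()*+,-./:;<=>?@[\\]^_`{|}~".toList

-- ===== PORT A =====
def process_title (title_string : String) : List String :=
  -- `char in string.punctuation` on a single char = list membership (exact)
  let processed : List Char := title_string.toList.foldl
    (fun acc c => acc ++ (if pvPunct.contains c then [' '] else [c])) []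
  let words := PySem.Chars.split₀ processed
  words.foldl
    (fun cl w => if w.length > 2 then cl ++ [String.ofList (PySem.Chars.lower w)] else cl) []

-- ===== PORT B =====
def pyFlush (buf : List Char) : List String :=
  if buf.length > 2 then [String.ofList (PySem.Chars.lower buf)] else []

def tokB : List Char → List Char → List String
  | [], buf => pyFlush buf
  | c :: rest, buf =>
    if PySem.Chars.isspace c || pvPunct.contains c then pyFlush buf ++ tokB rest []
    else tokB rest (buf ++ [c])

def process_title_alt (title_string : String) : List String :=
  tokB title_string.toList []

-- ===== PRECONDITION & SPEC =====
def Spec_process_title (title_string : String) (out : List String) : Prop := out = process_title_alt title_string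
instance (title_string : String) (out : List String) : Decidable (Spec_process_title title_string out) := by unfold Spec_process_title; infer_instance

-- ===== CLAIM (what is proved, stated in full; the proofs are below) =====
def Claim_equal_process_title : Prop := ∀ (title_string : String), Dom_process_title title_string → Spec_process_title title_string (process_title title_string)

-- ===== LEMMAS AND PROOFS =====
def pvRepl (c : Char) : Char := if pvPunct.contains c then ' ' else c

def pvF (ws : List (List Char)) : List String :=
  (ws.filter (fun w => w.length > 2)).map (fun w => String.ofList (PySem.Chars.lower w))

theorem pvF_append (a b : List (List Char)) : pvF (a ++ b) = pvF a ++ pvF b := by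
  simp [pvF]

theorem pvRepl_foldl (l : List Char) (init : List Char) :
    l.foldl (fun acc c => acc ++ (if pvPunct.contains c then [' '] else [c])) init
      = init ++ l.map pvRepl := by
  induction l generalizing init with
  | nil => simp
  | cons c rest ih =>
    rw [List.foldl_cons, List.map_cons, ih, pvRepl]
    by_cases h : c ∈ pvPunct <;> simp [h]

theorem pvFilter_foldl (ws : List (List Char)) (init : List String) :
    ws.foldl (fun cl w => if w.length > 2 then cl ++ [String.ofList (PySem.Chars.lower w)] else cl) init
      = init ++ pvF ws := by
  induction ws generalizing init with
  | nil => simp [pvF]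
  | cons w rest ih =>
    simp only [List.foldl_cons, ih]
    by_cases h : w.length > 2 <;> simp [pvF, h]

theorem pvSep_eq (c : Char) :
    PySem.Chars.isspace (pvRepl c) = (PySem.Chars.isspace c || pvPunct.contains c) := by
  by_cases h : c ∈ pvPunct
  · have h' : pvPunct.contains c = true := by simpa using h
    rw [pvRepl, if_pos h', h']
    simp
    decide
  · have h' : pvPunct.contains c = false := by simpa using h
    rw [pvRepl, if_neg (by simpa using h), h']
    simp

theorem pvFlush_nil : pyFlush [] = [] := by decide

theorem pvF_single (buf : List Char) : pvF [buf] = pyFlush buf := by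
  by_cases h : buf.length > 2 <;> simp [pvF, pyFlush, h]

theorem go_tok (s : List Char) (cur : List Char) (acc : List (List Char)) :
    pvF (PySem.Chars.split₀.go (s.map pvRepl) cur acc)
      = pvF acc.reverse ++ tokB s cur.reverse := by
  induction s generalizing cur acc with
  | nil =>
    rw [List.map_nil, PySem.Chars.split₀.go, tokB]
    by_cases h : cur = []
    · rw [if_pos (by simp [h]), h]
      simp [pvFlush_nil]
    · rw [if_neg (by simp [h]), List.reverse_cons, pvF_append, pvF_single]
  | cons c rest ih =>
    rw [List.map_cons, PySem.Chars.split₀.go, pvSep_eq, tokB]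
    by_cases hs : (PySem.Chars.isspace c || pvPunct.contains c) = true
    · rw [if_pos hs, if_pos hs]
      by_cases h : cur = []
      · rw [if_pos (by simp [h]), ih, h]
        simp [pvFlush_nil]
      · rw [if_neg (by simp [h]), ih [] (cur.reverse :: acc), List.reverse_cons,
          pvF_append, pvF_single, List.reverse_nil, List.append_assoc]
    · have hp : pvPunct.contains c = false := by
        cases hp' : pvPunct.contains c
        · rfl
        · exact absurd (by rw [hp']; simp) hs
      have hrepl : pvRepl c = c := by rw [pvRepl, if_neg (by simpa using hp)]
      rw [if_neg hs, if_neg hs, hrepl, ih (c :: cur) acc, List.reverse_cons]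

theorem process_title_eq (s : String) : process_title s = process_title_alt s := by
  unfold process_title process_title_alt PySem.Chars.split₀
  rw [pvRepl_foldl, List.nil_append, pvFilter_foldl, List.nil_append]
  have := go_tok s.toList [] []
  simpa using this

-- ===== VERDICT (by name: the statement is the Claim_ definition above) =====
theorem process_title_spec : Claim_equal_process_title := by
  intro s _
  exact process_title_eq s
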